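-- pv_equiv track=rewrite | github.com/furuhama/advent_of_code | day1/check_digits.py | get_sum_of_same_digits
-- ===== SOURCE A (Python) =====
-- def get_sum_of_same_digits(int_list):
--     """
--     if list[N] == list[N+1]
--     add list[N]
--     &&
--     if the last element of list equals the first element of the list
--     add last element
--     """
--     my_sum = 0
--     for i in range(len(int_list)):
--         # check the last element at first
--         if i == (len(int_list) - 1):
--             if int_list[i] == int_list[0]:
--                 my_sum += int_list[i]
--
--         # check elements except the last element
--         else:
--             if int_list[i] == int_list[i + 1]:
--                 my_sum += int_list[i]
--
--     return my_sum
-- ===== SOURCE B (Python) =====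
-- def get_sum_of_same_digits(int_list):
--     # Run-length encode the list; a run of value v and length c contributes
--     # v*(c-1); the circular wrap is handled by merging the last run into the
--     # first when their values match (one run means all elements are equal).
--     runs = []
--     for x in int_list:
--         if runs and runs[-1][0] == x:
--             runs[-1] = (x, runs[-1][1] + 1)
--         else:
--             runs.append((x, 1))
--     if not runs:
--         return 0
--     if len(runs) == 1:
--         v, c = runs[0]
--         return v * c
--     if runs[0][0] == runs[-1][0]:
--         runs = [(runs[0][0], runs[0][1] + runs[-1][1])] + runs[1:-1]
--     return sum(v * (c - 1) for v, c in runs)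
-- ===== Notes on version B (the rewrite author's own statement) =====
-- stated objective: alternative
-- what changed: Replaces the index loop with its last-index wraparound branch by a run-length-encoding pass followed by a per-run formula v*(c-1), merging the last run into the first when their values match (a single run means all elements are equal and contributes v*c).
import Mathlib
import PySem

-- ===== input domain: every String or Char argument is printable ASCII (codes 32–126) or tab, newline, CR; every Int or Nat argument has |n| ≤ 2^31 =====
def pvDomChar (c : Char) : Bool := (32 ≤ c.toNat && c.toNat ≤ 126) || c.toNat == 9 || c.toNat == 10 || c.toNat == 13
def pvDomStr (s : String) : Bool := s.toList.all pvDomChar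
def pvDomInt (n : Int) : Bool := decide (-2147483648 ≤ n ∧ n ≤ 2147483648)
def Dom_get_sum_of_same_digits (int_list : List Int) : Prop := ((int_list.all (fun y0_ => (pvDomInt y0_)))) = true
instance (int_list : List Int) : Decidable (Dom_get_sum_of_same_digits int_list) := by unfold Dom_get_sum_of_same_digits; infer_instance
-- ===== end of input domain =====

-- B replaces A's index loop with its wraparound branch by a run-length encoding
-- pass plus a per-run formula v*(c-1), merging the last run into the first on wrap
-- (objective: alternative — a different algorithm of the same O(n) cost).


-- ===== PORT A =====
-- literal port of A: loop over range(len(int_list)); special branch for i == len-1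
def get_sum_of_same_digits (int_list : List Int) : Int :=
  (PySem.List.pyRange 0 (int_list.length : Int)).foldl
    (fun my_sum i =>
      if i = (int_list.length : Int) - 1 then
        if PySem.List.pyGetD int_list i 0 = PySem.List.pyGetD int_list 0 0 then
          my_sum + PySem.List.pyGetD int_list i 0
        else my_sum
      else
        if PySem.List.pyGetD int_list i 0 = PySem.List.pyGetD int_list (i + 1) 0 then
          my_sum + PySem.List.pyGetD int_list i 0
        else my_sum)
    0

-- ===== PORT B =====
-- one step of B's run-building loop: extend the last run if its value is x, else append (x, 1)
def pvStep (runs : List (Int × Int)) (x : Int) : List (Int × Int) :=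
  match runs.getLast? with
  | some r => if r.1 = x then runs.dropLast ++ [(x, r.2 + 1)] else runs ++ [(x, 1)]
  | none => [(x, 1)]

-- literal port of B: build the run-length encoding, then the per-run formula
-- (the 'if not runs' / 'len(runs) == 1' branches appear as the match patterns)
def get_sum_of_same_digits_alt (int_list : List Int) : Int :=
  match int_list.foldl pvStep [] with
  | [] => 0
  | [(v, c)] => v * c
  | r0 :: r1 :: rest =>
      let last := (r1 :: rest).getLast (by simp)   -- runs[-1] on a nonempty list, exact
      let runs2 :=
        if r0.1 = last.1 then
          (r0.1, r0.2 + last.2) :: PySem.List.slice (r0 :: r1 :: rest) (some 1) (some (-1))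
        else r0 :: r1 :: rest
      (runs2.map (fun p => p.1 * (p.2 - 1))).sum

-- ===== PRECONDITION & SPEC =====
def Spec_get_sum_of_same_digits (int_list : List Int) (out : Int) : Prop := out = get_sum_of_same_digits_alt int_list
instance (int_list : List Int) (out : Int) : Decidable (Spec_get_sum_of_same_digits int_list out) := by unfold Spec_get_sum_of_same_digits; infer_instance

-- ===== CLAIM (what is proved, stated in full; the proofs are below) =====
def Claim_equal_get_sum_of_same_digits : Prop := ∀ (int_list : List Int), Dom_get_sum_of_same_digits int_list → Spec_get_sum_of_same_digits int_list (get_sum_of_same_digits int_list)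

-- ===== LEMMAS AND PROOFS =====

-- the common pairwise term: int_list[k] counted iff it equals its circular successor
def pvTerm (l : List Int) (k : Nat) : Int :=
  if l.getD k 0 = l.getD ((k + 1) % l.length) 0 then l.getD k 0 else 0

lemma A_eq_sum (l : List Int) :
    get_sum_of_same_digits l = ((List.range l.length).map (pvTerm l)).sum := by
  unfold get_sum_of_same_digits
  rw [PySem.List.pyRange_zero_natCast, List.foldl_map]
  rw [PySem.List.foldl_congr_mem (g := fun acc k => acc + pvTerm l k)]
  · rw [PySem.List.foldl_add]; simp
  · intro acc k hk
    rw [List.mem_range] at hk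
    by_cases h : k = l.length - 1
    · subst h
      rw [if_pos (show ((l.length - 1 : Nat) : Int) = (l.length : Int) - 1 by omega)]
      simp only [pvTerm, PySem.List.pyGetD_natCast, PySem.List.pyGetD_zero,
        Nat.sub_add_cancel (show 1 ≤ l.length by omega), Nat.mod_self]
      split_ifs <;> simp_all
    · rw [if_neg (show ((k : Nat) : Int) ≠ (l.length : Int) - 1 by omega)]
      have h1 : ((k : Int) + 1) = ((k + 1 : Nat) : Int) := by omega
      rw [h1]
      simp only [pvTerm, PySem.List.pyGetD_natCast, Nat.mod_eq_of_lt (show k + 1 < l.length by omega)]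
      split_ifs <;> simp_all
-- the circular pair sum, first element threaded through
def circSum (first : Int) : List Int → Int
  | [] => 0
  | [a] => if a = first then a else 0
  | a :: b :: t => (if a = b then a else 0) + circSum first (b :: t)

lemma range_sum_circ (l : List Int) (first : Int) :
    ((List.range l.length).map
      (fun k => if l.getD k 0 = (l ++ [first]).getD (k + 1) 0 then l.getD k 0 else 0)).sum
      = circSum first l := by
  induction l with
  | nil => rfl
  | cons a t ih =>
    rw [List.length_cons, List.range_succ_eq_map, List.map_cons, List.map_map, List.sum_cons]
    have hshift : ∀ k : Nat,
        ((fun k => if (a :: t).getD k 0 = ((a :: t) ++ [first]).getD (k + 1) 0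
            then (a :: t).getD k 0 else 0) ∘ Nat.succ) k
        = (fun k => if t.getD k 0 = (t ++ [first]).getD (k + 1) 0 then t.getD k 0 else 0) k := by
      intro k; simp
    rw [List.map_congr_left (fun k _ => hshift k), ih]
    cases t with
    | nil => simp [circSum]
    | cons b t' => simp [circSum]

lemma A_eq_circ (l : List Int) :
    get_sum_of_same_digits l = circSum (l.headD 0) l := by
  rw [A_eq_sum, ← range_sum_circ l (l.headD 0)]
  apply congrArg
  apply List.map_congr_left
  intro k hk
  rw [List.mem_range] at hk
  unfold pvTerm
  by_cases h : k + 1 < l.length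
  · rw [Nat.mod_eq_of_lt h, List.getD_append _ _ _ _ h]
  · have hl : k + 1 = l.length := by omega
    have h0 : 0 < l.length := by omega
    have hgd : (l ++ [l.headD 0]).getD l.length 0 = l.headD 0 := by
      rw [List.getD_eq_getElem?_getD, List.getElem?_append_right (le_refl _)]
      simp
    rw [hl, Nat.mod_self, hgd]
    cases l with
    | nil => simp at h0
    | cons a t => simp

-- B's run builder, in recursive form: the runs of (v repeated c) ++ xs
def rleFrom (v : Int) (c : Int) : List Int → List (Int × Int)
  | [] => [(v, c)]
  | x :: xs => if x = v then rleFrom v (c + 1) xs else (v, c) :: rleFrom x 1 xs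

lemma foldl_pvStep (xs : List Int) : ∀ (rs : List (Int × Int)) (v c : Int),
    xs.foldl pvStep (rs ++ [(v, c)]) = rs ++ rleFrom v c xs := by
  induction xs with
  | nil => intro rs v c; rfl
  | cons x t ih =>
    intro rs v c
    rw [List.foldl_cons]
    have hstep : pvStep (rs ++ [(v, c)]) x =
        if v = x then rs ++ [(x, c + 1)] else (rs ++ [(v, c)]) ++ [(x, 1)] := by
      unfold pvStep
      rw [List.getLast?_concat]
      dsimp only
      rw [List.dropLast_concat]
    rw [hstep]
    unfold rleFrom
    by_cases h : v = x
    · rw [if_pos h, if_pos h.symm, ← h]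
      exact ih rs v (c + 1)
    · rw [if_neg h, if_neg (fun hh => h hh.symm), ih, List.append_assoc]
      rfl

lemma foldl_pvStep_nil (x : Int) (xs : List Int) :
    (x :: xs).foldl pvStep [] = rleFrom x 1 xs := by
  rw [List.foldl_cons, show pvStep [] x = [] ++ [(x, 1)] from rfl, foldl_pvStep,
    List.nil_append]

lemma rleFrom_ne_nil (xs : List Int) (v c : Int) : rleFrom v c xs ≠ [] := by
  induction xs generalizing v c with
  | nil => simp [rleFrom]
  | cons x t ih =>
    unfold rleFrom
    split_ifs
    · exact ih v (c + 1)
    · simp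

lemma rleFrom_head (xs : List Int) : ∀ (v c : Int), ∃ c' rest, rleFrom v c xs = (v, c') :: rest := by
  induction xs with
  | nil => intro v c; exact ⟨c, [], rfl⟩
  | cons x t ih =>
    intro v c
    unfold rleFrom
    by_cases h : x = v
    · rw [if_pos h]; exact ih v (c + 1)
    · rw [if_neg h]; exact ⟨c, _, rfl⟩

-- per-run total plus the wrap term read off the last run
def runsTotal (first : Int) (rs : List (Int × Int)) : Int :=
  (rs.map (fun p => p.1 * (p.2 - 1))).sum +
    (match rs.getLast? with
     | some r => if r.1 = first then r.1 else 0
     | none => 0)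

lemma runsTotal_cons (first : Int) (p : Int × Int) (rs : List (Int × Int)) (h : rs ≠ []) :
    runsTotal first (p :: rs) = p.1 * (p.2 - 1) + runsTotal first rs := by
  cases rs with
  | nil => exact absurd rfl h
  | cons q t =>
    unfold runsTotal
    rw [List.getLast?_cons_cons, List.map_cons, List.sum_cons, add_assoc]

lemma rleFrom_total (xs : List Int) : ∀ (v c first : Int),
    runsTotal first (rleFrom v c xs) = v * (c - 1) + circSum first (v :: xs) := by
  induction xs with
  | nil =>
    intro v c first
    unfold rleFrom runsTotal
    simp [circSum]
  | cons x t ih =>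
    intro v c first
    unfold rleFrom
    by_cases h : x = v
    · rw [if_pos h, ih, h]
      have hc : circSum first (v :: v :: t) = (if v = v then v else 0) + circSum first (v :: t) := rfl
      rw [hc, if_pos rfl]
      ring
    · rw [if_neg h, runsTotal_cons first (v, c) _ (rleFrom_ne_nil t x 1), ih]
      have hc : circSum first (v :: x :: t) = (if v = x then v else 0) + circSum first (x :: t) := rfl
      rw [hc, if_neg (fun hh : v = x => h hh.symm)]
      ring

lemma slice_mid (r0 r1 : Int × Int) (rest : List (Int × Int)) :
    PySem.List.slice (r0 :: r1 :: rest) (some 1) (some (-1)) = (r1 :: rest).dropLast := by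
  rw [show (some (1 : Int)) = some (((1 : Nat) : Int)) from rfl, PySem.List.slice]
  simp only [PySem.List.clampIdx_natCast, PySem.List.clampIdx_neg_one, List.length_cons]
  have hmin : min 1 (rest.length + 1 + 1) = 1 := by omega
  rw [hmin]
  simp only [List.drop_one, List.tail_cons, List.dropLast_eq_take, List.length_cons]
  congr 1

lemma B_eq_total (x : Int) (xs : List Int) :
    get_sum_of_same_digits_alt (x :: xs) = runsTotal x (rleFrom x 1 xs) := by
  unfold get_sum_of_same_digits_alt
  rw [foldl_pvStep_nil]
  obtain ⟨c', rest, hr⟩ := rleFrom_head xs x 1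
  rw [hr]
  cases rest with
  | nil =>
    unfold runsTotal
    simp
    ring
  | cons r1 rest' =>
    dsimp only
    set lastp := (r1 :: rest').getLast (by simp) with hlast
    have hlast? : (r1 :: rest').getLast? = some lastp := List.getLast?_eq_getLast (by simp)
    have hdecomp : r1 :: rest' = (r1 :: rest').dropLast ++ [lastp] :=
      (List.dropLast_concat_getLast (by simp)).symm
    have hrt : runsTotal x ((x, c') :: r1 :: rest') =
        ((((x, c') :: r1 :: rest').map (fun p => p.1 * (p.2 - 1))).sum)
          + (if lastp.1 = x then lastp.1 else 0) := by
      unfold runsTotal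
      rw [List.getLast?_cons_cons, hlast?]
    rw [hrt, slice_mid]
    by_cases h : x = lastp.1
    · rw [if_pos h]
      conv_rhs => rw [hdecomp]
      rw [if_pos h.symm]
      simp only [List.map_cons, List.map_append, List.sum_cons, List.sum_append,
        List.map_nil, List.sum_nil]
      rw [← h]
      ring
    · rw [if_neg h, if_neg (fun hh : lastp.1 = x => h hh.symm), add_zero]

lemma B_eq_circ (l : List Int) :
    get_sum_of_same_digits_alt l = circSum (l.headD 0) l := by
  cases l with
  | nil => rfl
  | cons x xs =>
    rw [B_eq_total, rleFrom_total]
    simp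

-- ===== VERDICT (by name: the statement is the Claim_ definition above) =====
theorem get_sum_of_same_digits_spec : Claim_equal_get_sum_of_same_digits := by
  intro l _
  unfold Spec_get_sum_of_same_digits
  rw [A_eq_circ, B_eq_circ]
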